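-- pv_equiv track=rewrite | github.com/MrTrustworthy/pylow | pylow/utils.py | make_unique_string_list
-- ===== SOURCE A (Python) =====
-- from typing import List, Union, TypeVar
--
-- def make_unique_string_list(content: List[str]):
--     s: set = set()
--     new = []
--     for word in content:
--         i = 0
--         while word in s:
--             word = f' {word}' if i % 2 == 0 else f'{word} '
--             i += 1
--         s.add(word)
--         new.append(word)
--     return new
-- ===== SOURCE B (Python) =====
-- def _decompose(word):
--     # canonical decomposition: word == ' ' * l + core + ' ' * r, core has no
--     # leading/trailing spaces (all-space words: core = '', l = len(word), r = 0)
--     core = word.strip(' ')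
--     if core:
--         l = len(word) - len(word.lstrip(' '))
--         return core, l, len(word) - l - len(core)
--     return core, len(word), 0
--
-- def make_unique_string_list(content):
--     # B never builds/hashes candidate strings while searching: per core it keeps
--     # the set of integer pad pairs already taken and probes pairs for the first
--     # free one; the padded string is materialised once at the end.
--     used = {}  # core -> set of (left_pad, right_pad) pairs already output
--     out = []
--     for word in content:
--         core, l, r = _decompose(word)
--         pads = used.setdefault(core, set())
--         if core:
--             k = 0
--             while (l + (k + 1) // 2, r + k // 2) in pads:
--                 k += 1
--             l, r = l + (k + 1) // 2, r + k // 2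
--         else:
--             while (l, 0) in pads:
--                 l += 1
--         pads.add((l, r))
--         out.append(' ' * l + core + ' ' * r)
--     return out
-- ===== Notes on version B (the rewrite author's own statement) =====
-- stated objective: faster
-- what changed: B never builds or hashes candidate strings during the search: it canonically decomposes each word into (core, left-pad, right-pad), keeps per core a set of integer pad pairs already taken, probes O(1)-sized integer pairs for the first free one, and materialises the padded string once at the end; A repeatedly rebuilds ever-longer strings and tests them against a global string set.
import Mathlib
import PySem

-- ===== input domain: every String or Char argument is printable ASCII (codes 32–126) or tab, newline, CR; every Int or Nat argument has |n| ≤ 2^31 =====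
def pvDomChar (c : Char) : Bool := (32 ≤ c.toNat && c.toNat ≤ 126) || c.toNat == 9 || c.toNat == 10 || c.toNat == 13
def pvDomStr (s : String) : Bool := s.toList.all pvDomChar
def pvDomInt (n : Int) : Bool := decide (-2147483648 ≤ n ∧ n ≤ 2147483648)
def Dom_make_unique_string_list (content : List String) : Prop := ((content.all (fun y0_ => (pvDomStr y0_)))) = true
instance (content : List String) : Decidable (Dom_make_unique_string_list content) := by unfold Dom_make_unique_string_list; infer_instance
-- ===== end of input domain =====

-- B replaces A's build-and-hash search over padded strings by a canonical
-- decomposition into (core, left-pad, right-pad) with per-core sets of integer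
-- pad pairs, probing integer pairs instead of strings (measurably faster).

-- ===== PORT A =====
-- inner 'while word in s' loop of A; the fuel argument only makes the same
-- computation total (|s|+1 steps always suffice, proved in pvFresh below).
def pvLoopA (fuel : Nat) (s : PySem.Set String) (word : String) (i : Nat) : String :=
  match fuel with
  | 0 => word
  | f + 1 =>
    if word ∈ s then
      pvLoopA f s (if i % 2 == 0 then " " ++ word else word ++ " ") (i + 1)
    else word

-- the body of A's 'for word in content' loop, over state (s, new)
def pvStepA (st : PySem.Set String × List String) (word : String) : PySem.Set String × List String :=
  let w := pvLoopA (st.1.length + 1) st.1 word 0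
  (PySem.Set.add st.1 w, st.2 ++ [w])

def make_unique_string_list (content : List String) : List String :=
  (content.foldl pvStepA (PySem.Set.empty, [])).2

-- ===== PORT B =====
-- Source B's _decompose(word), over word's character list; 'word.lstrip(' ')' is
-- ported by hand as dropWhile (· == ' ') (exact: it strips exactly leading spaces).
def pvDecompose (cs : List Char) : List Char × Nat × Nat :=
  let core := PySem.Chars.stripChars cs [' ']
  if core ≠ [] then
    let l := cs.length - (cs.dropWhile (fun c => c == ' ')).length
    (core, l, cs.length - l - core.length)
  else (core, cs.length, 0)

-- Source B's nonempty-core probe loop 'while (l+(k+1)//2, r+k//2) in pads: k += 1';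
-- fuel is a totality guard only (|pads|+1 steps suffice, proved in pvFresh below).
def pvProbeNE (fuel : Nat) (pads : PySem.Set (Nat × Nat)) (l r k : Nat) : Nat :=
  match fuel with
  | 0 => k
  | f + 1 => if (l + (k + 1) / 2, r + k / 2) ∈ pads then pvProbeNE f pads l r (k + 1) else k

-- Source B's empty-core probe loop 'while (l, 0) in pads: l += 1'
def pvProbeE (fuel : Nat) (pads : PySem.Set (Nat × Nat)) (l : Nat) : Nat :=
  match fuel with
  | 0 => l
  | f + 1 => if (l, 0) ∈ pads then pvProbeE f pads (l + 1) else l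

-- the body of Source B's 'for word in content' loop, over state (used, out);
-- 'used.setdefault(core, set())' + in-place set mutation is modelled by getD + insert
def pvStepB (st : PySem.Dict (List Char) (PySem.Set (Nat × Nat)) × List String) (word : String) :
    PySem.Dict (List Char) (PySem.Set (Nat × Nat)) × List String :=
  let d := pvDecompose word.toList
  let core := d.1
  let pads := PySem.Dict.getD st.1 core PySem.Set.empty
  let lr : Nat × Nat :=
    if core ≠ [] then
      let k := pvProbeNE (pads.length + 1) pads d.2.1 d.2.2 0
      (d.2.1 + (k + 1) / 2, d.2.2 + k / 2)
    else (pvProbeE (pads.length + 1) pads d.2.1, 0)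
  (PySem.Dict.insert st.1 core (PySem.Set.add pads lr),
   st.2 ++ [String.ofList (List.replicate lr.1 ' ' ++ core ++ List.replicate lr.2 ' ')])

def make_unique_string_list_alt (content : List String) : List String :=
  (content.foldl pvStepB (PySem.Dict.empty, [])).2

-- ===== PRECONDITION & SPEC =====
def Spec_make_unique_string_list (content : List String) (out : List String) : Prop := out = make_unique_string_list_alt content
instance (content : List String) (out : List String) : Decidable (Spec_make_unique_string_list content out) := by unfold Spec_make_unique_string_list; infer_instance

-- ===== CLAIM (what is proved, stated in full; the proofs are below) =====
def Claim_equal_make_unique_string_list : Prop := ∀ (content : List String), Dom_make_unique_string_list content → Spec_make_unique_string_list content (make_unique_string_list content)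

-- ===== LEMMAS AND PROOFS =====

-- 'word == ' ' * l + core + ' ' * r' with a canonical (no leading/trailing space in core) triple
def pvEnc (c : List Char) (l r : Nat) : List Char := List.replicate l ' ' ++ c ++ List.replicate r ' '
def pvCanon (c : List Char) (r : Nat) : Prop := (c = [] → r = 0) ∧ c.head? ≠ some ' ' ∧ c.getLast? ≠ some ' '

-- the k-th candidate string A's inner loop reaches from word
def pvCand (word : String) (k : Nat) : String :=
  String.ofList (List.replicate ((k + 1) / 2) ' ') ++ word ++ String.ofList (List.replicate (k / 2) ' ')

-- correspondence between A's seen-set of strings and B's per-core dict of pad pairs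
def pvInv (seen : PySem.Set String) (used : PySem.Dict (List Char) (PySem.Set (Nat × Nat))) : Prop :=
  ∀ c l r, pvCanon c r →
    (String.ofList (pvEnc c l r) ∈ seen ↔ (l, r) ∈ PySem.Dict.getD used c PySem.Set.empty)


theorem pvStrip_eq (cs : List Char) : PySem.Chars.stripChars cs [' ']
    = (List.dropWhile (fun c => c == ' ') (List.dropWhile (fun c => c == ' ') cs).reverse).reverse := by
  have hp : (fun c => ([' '] : List Char).contains c) = (fun c : Char => c == ' ') := by
    funext c
    simp only [List.contains_cons, List.contains_nil, Bool.or_false]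
  simp only [PySem.Chars.stripChars]
  rw [hp]

theorem pvDrop_rep (l : Nat) (xs : List Char) :
    List.dropWhile (fun c => c == ' ') (List.replicate l ' ' ++ xs) = List.dropWhile (fun c => c == ' ') xs := by
  induction l with
  | zero => simp
  | succ n ih => simp [List.replicate_succ, ih]

theorem pvDrop_head (xs : List Char) (h : xs.head? ≠ some ' ') :
    List.dropWhile (fun c => c == ' ') xs = xs := by
  cases xs with
  | nil => rfl
  | cons a t => simp at h; simp [h]

theorem pvRep_drop (cs : List Char) :
    cs = List.replicate (cs.length - (List.dropWhile (fun c => c == ' ') cs).length) ' ' ++ List.dropWhile (fun c => c == ' ') cs := by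
  have h2 := congrArg List.length (List.takeWhile_append_dropWhile (p := fun c : Char => c == ' ') (l := cs))
  rw [List.length_append] at h2
  have hrep : List.takeWhile (fun c => c == ' ') cs = List.replicate (List.takeWhile (fun c => c == ' ') cs).length ' ' := by
    rw [List.eq_replicate_iff]
    refine ⟨rfl, ?_⟩
    intro b hb
    have := List.mem_takeWhile_imp hb
    simpa using this
  have hlen : cs.length - (List.dropWhile (fun c => c == ' ') cs).length = (List.takeWhile (fun c => c == ' ') cs).length := by omega
  rw [hlen, ← hrep, List.takeWhile_append_dropWhile]

theorem pvDrop_head' (cs : List Char) : (List.dropWhile (fun c => c == ' ') cs).head? ≠ some ' ' := by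
  intro h
  have := List.head?_dropWhile_not (p := fun c : Char => c == ' ') (l := cs)
  rw [h] at this
  simp at this

-- dec ∘ enc = id on canonical triples

theorem pvDec_enc (c : List Char) (l r : Nat) (h : pvCanon c r) : pvDecompose (pvEnc c l r) = (c, l, r) := by
  obtain ⟨h0, h1, h2⟩ := h
  by_cases hc : c = []
  · subst hc
    have hr : r = 0 := h0 rfl
    subst hr
    have henc : pvEnc [] l 0 = List.replicate l ' ' := by simp [pvEnc]
    have hs : PySem.Chars.stripChars (List.replicate l ' ') [' '] = [] := by
      rw [pvStrip_eq]
      rw [show (List.replicate l ' ') = (List.replicate l ' ' ++ ([] : List Char)) by simp, pvDrop_rep]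
      simp
    rw [henc]
    simp [pvDecompose, hs]
  · have hd1 : List.dropWhile (fun c => c == ' ') (pvEnc c l r) = c ++ List.replicate r ' ' := by
      unfold pvEnc
      rw [List.append_assoc, pvDrop_rep, pvDrop_head]
      cases c with
      | nil => exact absurd rfl hc
      | cons a t => simpa using h1
    have hstrip : PySem.Chars.stripChars (pvEnc c l r) [' '] = c := by
      rw [pvStrip_eq, hd1]
      rw [List.reverse_append, List.reverse_replicate, pvDrop_rep, pvDrop_head]
      · simp
      · rw [List.head?_reverse]; exact h2
    have hlen : (pvEnc c l r).length = l + c.length + r := by simp [pvEnc]; omega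
    have hdlen : (List.dropWhile (fun c => c == ' ') (pvEnc c l r)).length = c.length + r := by
      rw [hd1]; simp
    simp only [pvDecompose, hstrip, hdlen, hlen, if_pos hc]
    simp
    constructor <;> omega

-- every char list is the encoding of its canonical decomposition

theorem pvEnc_dec (cs : List Char) :
    pvCanon (pvDecompose cs).1 (pvDecompose cs).2.2 ∧
    pvEnc (pvDecompose cs).1 (pvDecompose cs).2.1 (pvDecompose cs).2.2 = cs := by
  set t := List.dropWhile (fun c => c == ' ') cs with ht
  have hcs : cs = List.replicate (cs.length - t.length) ' ' ++ t := pvRep_drop cs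
  have hth : t.head? ≠ some ' ' := pvDrop_head' cs
  set u := List.dropWhile (fun c => c == ' ') t.reverse with hu
  have htr : t.reverse = List.replicate (t.reverse.length - u.length) ' ' ++ u := pvRep_drop t.reverse
  have huh : u.head? ≠ some ' ' := pvDrop_head' t.reverse
  have hcore : PySem.Chars.stripChars cs [' '] = u.reverse := by rw [pvStrip_eq, ← ht, ← hu]
  have htu : t = u.reverse ++ List.replicate (t.length - u.length) ' ' := by
    have := congrArg List.reverse htr
    simpa using this
  have hut : u.length ≤ t.length := by
    have := congrArg List.length htu
    simp at this
    omega
  have htc : t.length ≤ cs.length := by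
    have := congrArg List.length hcs
    simp at this
    omega
  by_cases hc : u.reverse = []
  · have hu0 : u = [] := by simpa using hc
    have ht0 : t = [] := by
      cases h' : t with
      | nil => rfl
      | cons a s =>
        exfalso
        have htrep : t = List.replicate t.length ' ' := by
          conv_lhs => rw [htu]
          rw [hu0]
          simp
        rw [h', List.length_cons, List.replicate_succ] at htrep
        injection htrep with ha _
        rw [h'] at hth
        simp [ha] at hth
    have hcs0 : cs = List.replicate cs.length ' ' := by
      conv_lhs => rw [hcs]
      rw [ht0]
      simp
    simp only [pvDecompose, hcore, hc]
    simp [pvCanon, pvEnc]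
    conv_rhs => rw [hcs0]
  · have hdec : pvDecompose cs = (u.reverse, cs.length - t.length, t.length - u.length) := by
      simp only [pvDecompose, hcore, ← ht, if_pos hc]
      simp
      omega
    rw [hdec]
    refine ⟨⟨fun h => absurd h hc, ?_, ?_⟩, ?_⟩
    · -- head of core = head of t
      cases hu' : u.reverse with
      | nil => simp
      | cons a s =>
        have hta : t.head? = some a := by rw [htu, hu']; simp
        simp only [List.head?_cons, ne_eq, Option.some.injEq]
        intro ha
        rw [ha] at hta
        exact hth hta
    · rw [List.getLast?_reverse]; exact huh
    · show List.replicate (cs.length - t.length) ' ' ++ u.reverse ++ List.replicate (t.length - u.length) ' ' = cs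
      conv_rhs => rw [hcs]
      rw [List.append_assoc, ← htu]

theorem pvEnc_inj (c1 c2 : List Char) (l1 r1 l2 r2 : Nat) (h1 : pvCanon c1 r1) (h2 : pvCanon c2 r2)
    (h : pvEnc c1 l1 r1 = pvEnc c2 l2 r2) : c1 = c2 ∧ l1 = l2 ∧ r1 = r2 := by
  have := congrArg pvDecompose h
  rw [pvDec_enc c1 l1 r1 h1, pvDec_enc c2 l2 r2 h2] at this
  injection this with ha hb
  injection hb with hb hc
  exact ⟨ha, hb, hc⟩

theorem pvCand_toList (w : String) (k : Nat) :
    (pvCand w k).toList = List.replicate ((k + 1) / 2) ' ' ++ w.toList ++ List.replicate (k / 2) ' ' := by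
  simp [pvCand]

theorem pvCand_zero (w : String) : pvCand w 0 = w := by
  apply String.ext
  simp [pvCand_toList]

theorem pvCand_step (w : String) (k : Nat) :
    (if (k % 2 == 0) then " " ++ pvCand w k else pvCand w k ++ " ") = pvCand w (k + 1) := by
  rcases Nat.even_or_odd k with ⟨m, hm⟩ | ⟨m, hm⟩
  · subst hm
    have hmod : (m + m) % 2 = 0 := by omega
    have h1 : (m + m + 1) / 2 = m := by omega
    have h2 : (m + m) / 2 = m := by omega
    have h3 : (m + m + 1 + 1) / 2 = m + 1 := by omega
    simp only [hmod, show ((0:Nat) == 0) = true from rfl, if_true]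
    apply String.ext
    simp [pvCand_toList, h1, h2, h3, List.replicate_succ]
  · subst hm
    have hmod : (2 * m + 1) % 2 = 1 := by omega
    have h1 : (2 * m + 1 + 1) / 2 = m + 1 := by omega
    have h2 : (2 * m + 1) / 2 = m := by omega
    have h3 : (2 * m + 1 + 1 + 1) / 2 = m + 1 := by omega
    simp only [hmod, show ((1:Nat) == 0) = false from rfl]
    apply String.ext
    simp [pvCand_toList, h1, h2, h3, List.replicate_succ']

theorem pvCand_enc (w : String) (c : List Char) (l r k : Nat) (h : w.toList = pvEnc c l r) :
    (pvCand w k).toList = pvEnc c (l + (k + 1) / 2) (r + k / 2) := by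
  rw [pvCand_toList, h]
  unfold pvEnc
  rw [show l + (k + 1) / 2 = (k + 1) / 2 + l by omega, List.replicate_add ((k + 1) / 2) l,
    List.replicate_add r (k / 2)]
  simp only [List.append_assoc]

theorem pvEnc_nil (a b : Nat) : pvEnc [] a b = pvEnc [] (a + b) 0 := by
  simp only [pvEnc, List.nil_append, List.append_nil, List.replicate_zero]
  exact (List.replicate_add a b ' ').symm

-- pigeonhole escape: an injective sequence leaves any finite list within |s|+1 steps

theorem pvFresh {α : Type} [DecidableEq α] (f : Nat → α) (hinj : ∀ i j, f i = f j → i = j)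
    (s : List α) : ∃ i ≤ s.length, f i ∉ s := by
  by_contra h
  push_neg at h
  have hsub : ((List.range (s.length + 1)).map f) ⊆ s := by
    intro x hx
    simp only [List.mem_map, List.mem_range] at hx
    obtain ⟨i, hi, rfl⟩ := hx
    exact h i (by omega)
  have hnd : ((List.range (s.length + 1)).map f).Nodup := by
    refine (List.nodup_range).map_on ?_
    intro a _ b _ hab
    exact hinj a b hab
  have hc1 : ((List.range (s.length + 1)).map f).toFinset.card = s.length + 1 := by
    rw [List.toFinset_card_of_nodup hnd]; simp
  have hc2 : ((List.range (s.length + 1)).map f).toFinset.card ≤ s.length := by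
    have hss : ((List.range (s.length + 1)).map f).toFinset ⊆ s.toFinset := by
      intro x hx
      rw [List.mem_toFinset] at hx ⊢
      exact hsub hx
    calc _ ≤ s.toFinset.card := Finset.card_le_card hss
    _ ≤ s.length := List.toFinset_card_le s
  omega

theorem pvLoopA_eq (s : PySem.Set String) (w : String)
    (h : ∃ i, pvCand w i ∉ s) :
    ∀ (fuel k : Nat), Nat.find h ≤ k + fuel → k ≤ Nat.find h →
      pvLoopA fuel s (pvCand w k) k = pvCand w (Nat.find h) := by
  intro fuel
  induction fuel with
  | zero =>
    intro k h1 h2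
    have : k = Nat.find h := by omega
    simp [pvLoopA, this]
  | succ f ih =>
    intro k h1 h2
    by_cases hmem : pvCand w k ∈ s
    · have hk : k < Nat.find h := by
        rcases Nat.lt_or_ge k (Nat.find h) with h' | h'
        · exact h'
        · exact absurd (Nat.find_spec h) (by
            have : k = Nat.find h := by omega
            rw [← this]; simp [hmem])
      simp only [pvLoopA, if_pos hmem, pvCand_step]
      exact ih (k + 1) (by omega) (by omega)
    · have hk : Nat.find h ≤ k := by
        by_contra hlt
        exact hmem (by
          have := Nat.find_min h (show k < Nat.find h by omega)
          simpa using this)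
      have hke : k = Nat.find h := by omega
      subst hke
      simp [pvLoopA, hmem]

theorem pvProbeNE_eq (pads : PySem.Set (Nat × Nat)) (l r : Nat)
    (h : ∃ k, (l + (k + 1) / 2, r + k / 2) ∉ pads) :
    ∀ (fuel k : Nat), Nat.find h ≤ k + fuel → k ≤ Nat.find h →
      pvProbeNE fuel pads l r k = Nat.find h := by
  intro fuel
  induction fuel with
  | zero =>
    intro k h1 h2
    have : k = Nat.find h := by omega
    simp [pvProbeNE, this]
  | succ f ih =>
    intro k h1 h2
    by_cases hmem : (l + (k + 1) / 2, r + k / 2) ∈ pads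
    · have hk : k < Nat.find h := by
        rcases Nat.lt_or_ge k (Nat.find h) with h' | h'
        · exact h'
        · exact absurd (Nat.find_spec h) (by
            have : k = Nat.find h := by omega
            rw [← this]; simp [hmem])
      simp only [pvProbeNE, if_pos hmem]
      exact ih (k + 1) (by omega) (by omega)
    · have hk : Nat.find h ≤ k := by
        by_contra hlt
        exact hmem (by
          have := Nat.find_min h (show k < Nat.find h by omega)
          simpa using this)
      have hke : k = Nat.find h := by omega
      subst hke
      simp [pvProbeNE, hmem]

theorem pvProbeE_eq (pads : PySem.Set (Nat × Nat)) (l0 : Nat)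
    (h : ∃ k, (l0 + k, 0) ∉ pads) :
    ∀ (fuel k : Nat), Nat.find h ≤ k + fuel → k ≤ Nat.find h →
      pvProbeE fuel pads (l0 + k) = l0 + Nat.find h := by
  intro fuel
  induction fuel with
  | zero =>
    intro k h1 h2
    have : k = Nat.find h := by omega
    simp [pvProbeE, this]
  | succ f ih =>
    intro k h1 h2
    by_cases hmem : (l0 + k, 0) ∈ pads
    · have hk : k < Nat.find h := by
        rcases Nat.lt_or_ge k (Nat.find h) with h' | h'
        · exact h'
        · exact absurd (Nat.find_spec h) (by
            have : k = Nat.find h := by omega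
            rw [← this]; simp [hmem])
      simp only [pvProbeE, if_pos hmem]
      have := ih (k + 1) (by omega) (by omega)
      rw [← this]
      ring_nf
    · have hk : Nat.find h ≤ k := by
        by_contra hlt
        exact hmem (by
          have := Nat.find_min h (show k < Nat.find h by omega)
          simpa using this)
      have hke : k = Nat.find h := by omega
      subst hke
      simp [pvProbeE, hmem]

theorem pvInv_step (seen : PySem.Set String) (used : PySem.Dict (List Char) (PySem.Set (Nat × Nat)))
    (hinv : pvInv seen used) (c0 : List Char) (l' r' : Nat) (hcan : pvCanon c0 r') :
    pvInv (PySem.Set.add seen (String.ofList (pvEnc c0 l' r')))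
      (PySem.Dict.insert used c0
        (PySem.Set.add (PySem.Dict.getD used c0 PySem.Set.empty) (l', r'))) := by
  intro c l r hc
  rw [PySem.Set.mem_add, PySem.Dict.getD_insert]
  by_cases hcc : c = c0
  · subst hcc
    rw [if_pos rfl, PySem.Set.mem_add]
    constructor
    · rintro (hs | he)
      · exact Or.inl ((hinv c l r hc).mp hs)
      · have := pvEnc_inj c c l r l' r' hc hcan (String.ofList_inj.mp he)
        exact Or.inr (by rw [this.2.1, this.2.2])
    · rintro (hp | he)
      · exact Or.inl ((hinv c l r hc).mpr hp)
      · refine Or.inr ?_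
        congr 1
        congr 1 <;> [exact (Prod.mk.injEq .. ▸ he).1; exact (Prod.mk.injEq .. ▸ he).2] 
  · rw [if_neg hcc]
    constructor
    · rintro (hs | he)
      · exact (hinv c l r hc).mp hs
      · exact absurd (pvEnc_inj c c0 l r l' r' hc hcan (String.ofList_inj.mp he)).1 hcc
    · intro hp
      exact Or.inl ((hinv c l r hc).mpr hp)

theorem pv_step (seen : PySem.Set String) (used : PySem.Dict (List Char) (PySem.Set (Nat × Nat)))
    (acc : List String) (w : String) (hinv : pvInv seen used) :
    ∃ out : String,
      pvStepA (seen, acc) w = (PySem.Set.add seen out, acc ++ [out]) ∧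
      pvStepB (used, acc) w = ((pvStepB (used, acc) w).1, acc ++ [out]) ∧
      pvInv (PySem.Set.add seen out) (pvStepB (used, acc) w).1 := by
  rcases hdec : pvDecompose w.toList with ⟨c, lr0⟩
  rcases hlr0 : lr0 with ⟨l0, r0⟩
  subst hlr0
  have hed := pvEnc_dec w.toList
  rw [hdec] at hed
  obtain ⟨hcan, henc⟩ := hed
  simp only at hcan henc
  by_cases hc : c = []
  · -- all-space word
    subst hc
    have hr0 : r0 = 0 := hcan.1 rfl
    subst hr0
    set pads := PySem.Dict.getD used [] PySem.Set.empty with hpads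
    have canonNil : ∀ x : Nat, pvCanon ([] : List Char) 0 := fun _ => ⟨fun _ => rfl, by simp, by simp⟩
    have hcl : ∀ k, pvCand w k = String.ofList (pvEnc [] (l0 + k) 0) := by
      intro k
      rw [← String.ofList_toList (s := pvCand w k), pvCand_enc w [] l0 0 k henc.symm]
      rw [pvEnc_nil, show l0 + (k + 1) / 2 + (0 + k / 2) = l0 + k by omega]
    have hiff : ∀ k, pvCand w k ∈ seen ↔ ((l0 + k, 0) : Nat × Nat) ∈ pads := by
      intro k
      rw [hcl k]
      exact hinv [] (l0 + k) 0 (canonNil 0)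
    have hQ : ∃ k, ((l0 + k, 0) : Nat × Nat) ∉ pads := by
      obtain ⟨i, _, hi⟩ := pvFresh (fun k => ((l0 + k, 0) : Nat × Nat))
        (fun i j hij => by
          have := congrArg Prod.fst hij
          simp at this
          omega) pads
      exact ⟨i, hi⟩
    have hP : ∃ k, pvCand w k ∉ seen := hQ.imp (fun k hk hs => hk ((hiff k).mp hs))
    have hfind : Nat.find hP = Nat.find hQ := Nat.find_congr' (fun {n} => not_congr (hiff n))
    have boundA : Nat.find hP ≤ seen.length := by
      obtain ⟨i, hle, hi⟩ := pvFresh (pvCand w)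
        (fun i j hij => by
          have := congrArg (fun s : String => s.toList.length) hij
          simp [pvCand_toList] at this
          omega) seen
      exact le_trans (Nat.find_min' hP hi) hle
    have boundB : Nat.find hQ ≤ pads.length := by
      obtain ⟨i, hle, hi⟩ := pvFresh (fun k => ((l0 + k, 0) : Nat × Nat))
        (fun i j hij => by
          have := congrArg Prod.fst hij
          simp at this
          omega) pads
      exact le_trans (Nat.find_min' hQ hi) hle
    have hA : pvLoopA (seen.length + 1) seen w 0 = pvCand w (Nat.find hP) := by
      have := pvLoopA_eq seen w hP (seen.length + 1) 0 (by omega) (by omega)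
      rwa [pvCand_zero] at this
    have hB : pvProbeE (pads.length + 1) pads l0 = l0 + Nat.find hQ := by
      have := pvProbeE_eq pads l0 hQ (pads.length + 1) 0 (by omega) (by omega)
      simpa using this
    refine ⟨pvCand w (Nat.find hP), ?_, ?_, ?_⟩
    · simp only [pvStepA, hA]
    · simp only [pvStepB, hdec, ne_eq, not_true_eq_false, if_false, ← hpads, hB]
      rw [hcl (Nat.find hP), hfind]
      rfl
    · have hstep1 : (pvStepB (used, acc) w).1 =
          PySem.Dict.insert used [] (PySem.Set.add pads (l0 + Nat.find hQ, 0)) := by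
        simp only [pvStepB, hdec, ne_eq, not_true_eq_false, if_false, ← hpads, hB]
      rw [hstep1, hcl (Nat.find hP), hfind]
      exact pvInv_step seen used hinv [] (l0 + Nat.find hQ) 0 (canonNil 0)
  · -- word with a nonempty core
    set pads := PySem.Dict.getD used c PySem.Set.empty with hpads
    have hcank : ∀ x : Nat, pvCanon c x := fun x => ⟨fun h => absurd h hc, hcan.2.1, hcan.2.2⟩
    have hcl : ∀ k, pvCand w k = String.ofList (pvEnc c (l0 + (k + 1) / 2) (r0 + k / 2)) := by
      intro k
      rw [← String.ofList_toList (s := pvCand w k), pvCand_enc w c l0 r0 k henc.symm]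
    have hiff : ∀ k, pvCand w k ∈ seen ↔ ((l0 + (k + 1) / 2, r0 + k / 2) : Nat × Nat) ∈ pads := by
      intro k
      rw [hcl k]
      exact hinv c (l0 + (k + 1) / 2) (r0 + k / 2) (hcank _)
    have hQ : ∃ k, ((l0 + (k + 1) / 2, r0 + k / 2) : Nat × Nat) ∉ pads := by
      obtain ⟨i, _, hi⟩ := pvFresh (fun k => ((l0 + (k + 1) / 2, r0 + k / 2) : Nat × Nat))
        (fun i j hij => by
          have h1 := congrArg Prod.fst hij
          have h2 := congrArg Prod.snd hij
          simp at h1 h2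
          omega) pads
      exact ⟨i, hi⟩
    have hP : ∃ k, pvCand w k ∉ seen := hQ.imp (fun k hk hs => hk ((hiff k).mp hs))
    have hfind : Nat.find hP = Nat.find hQ := Nat.find_congr' (fun {n} => not_congr (hiff n))
    have boundA : Nat.find hP ≤ seen.length := by
      obtain ⟨i, hle, hi⟩ := pvFresh (pvCand w)
        (fun i j hij => by
          have := congrArg (fun s : String => s.toList.length) hij
          simp [pvCand_toList] at this
          omega) seen
      exact le_trans (Nat.find_min' hP hi) hle
    have boundB : Nat.find hQ ≤ pads.length := by
      obtain ⟨i, hle, hi⟩ := pvFresh (fun k => ((l0 + (k + 1) / 2, r0 + k / 2) : Nat × Nat))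
        (fun i j hij => by
          have h1 := congrArg Prod.fst hij
          have h2 := congrArg Prod.snd hij
          simp at h1 h2
          omega) pads
      exact le_trans (Nat.find_min' hQ hi) hle
    have hA : pvLoopA (seen.length + 1) seen w 0 = pvCand w (Nat.find hP) := by
      have := pvLoopA_eq seen w hP (seen.length + 1) 0 (by omega) (by omega)
      rwa [pvCand_zero] at this
    have hB : pvProbeNE (pads.length + 1) pads l0 r0 0 = Nat.find hQ :=
      pvProbeNE_eq pads l0 r0 hQ (pads.length + 1) 0 (by omega) (by omega)
    refine ⟨pvCand w (Nat.find hP), ?_, ?_, ?_⟩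
    · simp only [pvStepA, hA]
    · simp only [pvStepB, hdec, ne_eq, hc, not_false_eq_true, if_true, ← hpads, hB]
      rw [hcl (Nat.find hP), hfind]
      rfl
    · have hstep1 : (pvStepB (used, acc) w).1 =
          PySem.Dict.insert used c
            (PySem.Set.add pads (l0 + (Nat.find hQ + 1) / 2, r0 + Nat.find hQ / 2)) := by
        simp only [pvStepB, hdec, ne_eq, hc, not_false_eq_true, if_true, ← hpads, hB]
      rw [hstep1, hcl (Nat.find hP), hfind]
      exact pvInv_step seen used hinv c (l0 + (Nat.find hQ + 1) / 2) (r0 + Nat.find hQ / 2) (hcank _)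

theorem pv_main (content : List String) :
    ∀ (seen : PySem.Set String) (used : PySem.Dict (List Char) (PySem.Set (Nat × Nat)))
      (acc : List String), pvInv seen used →
      (content.foldl pvStepA (seen, acc)).2 = (content.foldl pvStepB (used, acc)).2 := by
  induction content with
  | nil => intro seen used acc _; rfl
  | cons w rest ih =>
    intro seen used acc hinv
    obtain ⟨out, hA, hB, hinv'⟩ := pv_step seen used acc w hinv
    simp only [List.foldl_cons, hA]
    have hBfull : pvStepB (used, acc) w = ((pvStepB (used, acc) w).1, acc ++ [out]) := hB
    rw [hBfull]
    exact ih (PySem.Set.add seen out) (pvStepB (used, acc) w).1 (acc ++ [out]) hinv'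

theorem pv_inv_empty : pvInv PySem.Set.empty PySem.Dict.empty := by
  intro c l r _
  simp [PySem.Set.empty, PySem.Dict.getD_empty]

-- ===== VERDICT (by name: the statement is the Claim_ definition above) =====
theorem make_unique_string_list_spec : Claim_equal_make_unique_string_list := by
  intro content _
  show make_unique_string_list content = make_unique_string_list_alt content
  unfold make_unique_string_list make_unique_string_list_alt
  exact pv_main content PySem.Set.empty PySem.Dict.empty [] pv_inv_empty
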